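-- pv_equiv track=rewrite | github.com/CSID-DGU/2020-1-CECD3-WAS-6 | Fault Localizer/Tarantula/src/maxunit.py | maxunit
-- ===== SOURCE A (Python) =====
-- def maxunit(x,y):
-- 	max = 0
-- 	min = 0
-- 	if(x > y):
-- 		max = x
-- 		min = y
-- 	else:
-- 		max = y
-- 		min = x
-- 	for i in range(1,10):
-- 		max = max + min	#bug
--
-- 	return max+min
-- ===== SOURCE B (Python) =====
-- def maxunit(x, y):
--     # Closed form: the loop adds the smaller value 9 times to the larger,
--     # and the return adds it once more: larger + 10*smaller.
--     larger, smaller = (x, y) if x > y else (y, x)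
--     return larger + 10 * smaller
-- ===== Notes on version B (the rewrite author's own statement) =====
-- stated objective: simpler
-- what changed: Replaced the 9-iteration accumulation loop plus final add with the closed form larger + 10*smaller.
import Mathlib
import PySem

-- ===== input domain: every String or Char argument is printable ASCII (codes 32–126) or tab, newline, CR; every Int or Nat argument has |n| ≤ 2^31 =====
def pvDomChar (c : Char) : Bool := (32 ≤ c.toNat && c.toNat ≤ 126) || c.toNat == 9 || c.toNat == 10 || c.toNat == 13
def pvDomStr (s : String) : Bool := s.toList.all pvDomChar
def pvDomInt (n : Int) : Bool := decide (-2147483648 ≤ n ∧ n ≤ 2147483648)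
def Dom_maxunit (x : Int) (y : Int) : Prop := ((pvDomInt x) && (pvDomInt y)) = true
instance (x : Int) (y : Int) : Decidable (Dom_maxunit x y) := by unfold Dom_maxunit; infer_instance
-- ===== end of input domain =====

-- B replaces A's fixed 9-iteration accumulation loop with the closed form larger + 10*smaller (simpler).


-- ===== PORT A =====
-- Literal port of A: fold over range(1,10) adding min to max, then return max+min.
def maxunit (x : Int) (y : Int) : Int :=
  let mx : Int := 0
  let mn : Int := 0
  let (mx, mn) := if x > y then (x, y) else (y, x)
  let mx := (PySem.List.pyRange 1 10 1).foldl (fun mx _ => mx + mn) mx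
  mx + mn

-- ===== PORT B =====
-- B: closed form larger + 10*smaller.
def maxunit_alt (x : Int) (y : Int) : Int :=
  let (larger, smaller) := if x > y then (x, y) else (y, x)
  larger + 10 * smaller

-- ===== PRECONDITION & SPEC =====
def Spec_maxunit (x : Int) (y : Int) (out : Int) : Prop := out = maxunit_alt x y
instance (x : Int) (y : Int) (out : Int) : Decidable (Spec_maxunit x y out) := by unfold Spec_maxunit; infer_instance

-- ===== CLAIM (what is proved, stated in full; the proofs are below) =====
def Claim_equal_maxunit : Prop := ∀ (x : Int) (y : Int), Dom_maxunit x y → Spec_maxunit x y (maxunit x y)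

-- ===== LEMMAS AND PROOFS =====

-- ===== VERDICT (by name: the statement is the Claim_ definition above) =====
theorem maxunit_spec : Claim_equal_maxunit := by
  intro x y _
  unfold Spec_maxunit maxunit maxunit_alt
  by_cases h : x > y <;> simp [h, PySem.List.pyRange, List.range_succ] <;> ring
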